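-- pv_equiv track=rewrite | github.com/FloresMaximiliano/python-duoc | ## ejercicio tipo prueba.py | cotizar
-- ===== SOURCE A (Python) =====
-- def cotizar(asistentes):
--     tarifa = [
--     (50,     1000000, 1500000),          ## tupla
--     (100,    1800000, 2400000),
--     (200,    3500000, 4000000),
--     (300,    4100000, 4600000),
-- ]
--     ##funcion
--     for limite, precio_un_menu,precio_buffet in tarifa:          ## Recorre la tupla
--         if asistentes<=limite:                            ##condicional
--             return precio_un_menu, precio_buffet
--
--     return None,None
-- ===== SOURCE B (Python) =====
-- def cotizar(asistentes):
--     limites = [50, 100, 200, 300]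
--     precios = [(1000000, 1500000), (1800000, 2400000),
--                (3500000, 4000000), (4100000, 4600000)]
--     # bisect_left: first index i with limites[i] >= asistentes
--     lo, hi = 0, len(limites)
--     while lo < hi:
--         mid = (lo + hi) // 2
--         if limites[mid] < asistentes:
--             lo = mid + 1
--         else:
--             hi = mid
--     if lo < len(limites):
--         return precios[lo]
--     return None, None
-- ===== Notes on version B (the rewrite author's own statement) =====
-- stated objective: alternative
-- what changed: Replaces the sequential scan of (limit, price, price) triples by a hand-written bisect_left binary search over a sorted list of limits with a parallel list of price pairs.
import Mathlib
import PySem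

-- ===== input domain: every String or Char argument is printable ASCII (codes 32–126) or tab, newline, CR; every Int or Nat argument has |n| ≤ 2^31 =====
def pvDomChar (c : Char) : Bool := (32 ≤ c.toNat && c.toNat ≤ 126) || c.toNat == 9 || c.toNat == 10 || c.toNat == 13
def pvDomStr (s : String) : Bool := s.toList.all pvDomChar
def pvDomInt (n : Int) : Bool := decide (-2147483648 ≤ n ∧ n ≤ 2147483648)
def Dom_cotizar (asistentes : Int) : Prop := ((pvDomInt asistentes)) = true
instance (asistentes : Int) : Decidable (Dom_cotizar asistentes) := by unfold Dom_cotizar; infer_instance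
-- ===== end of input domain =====

-- B replaces A's sequential scan of the tariff table by a binary search (bisect_left)
-- over a sorted list of limits paired with a parallel price list; same result, alternative structure.

-- ===== PORT A =====
-- the for-loop over the tariff triples, returning on the first limit ≥ asistentes
def cotizarLoop (asistentes : Int) : List (Int × Int × Int) → Option Int × Option Int
  | [] => (none, none)
  | (limite, precio_un_menu, precio_buffet) :: rest =>
      if asistentes ≤ limite then (some precio_un_menu, some precio_buffet)
      else cotizarLoop asistentes rest

def cotizar (asistentes : Int) : Option Int × Option Int :=
  let tarifa : List (Int × Int × Int) :=
    [(50, 1000000, 1500000), (100, 1800000, 2400000),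
     (200, 3500000, 4000000), (300, 4100000, 4600000)]
  cotizarLoop asistentes tarifa

-- ===== PORT B =====
-- hand-written bisect_left: first index i in [lo, hi) with xs[i] ≥ x
def bisectLeft (xs : List Int) (x : Int) (lo hi : Nat) : Nat :=
  if lo < hi then
    let mid := (lo + hi) / 2
    if xs.getD mid 0 < x then bisectLeft xs x (mid + 1) hi
    else bisectLeft xs x lo mid
  else lo
termination_by hi - lo
decreasing_by all_goals omega

def cotizar_alt (asistentes : Int) : Option Int × Option Int :=
  let limites : List Int := [50, 100, 200, 300]
  let precios : List (Int × Int) :=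
    [(1000000, 1500000), (1800000, 2400000), (3500000, 4000000), (4100000, 4600000)]
  let lo := bisectLeft limites asistentes 0 limites.length
  if lo < limites.length then
    let p := precios.getD lo (0, 0)
    (some p.1, some p.2)
  else (none, none)

-- ===== PRECONDITION & SPEC =====
def Spec_cotizar (asistentes : Int) (out : Option Int × Option Int) : Prop := out = cotizar_alt asistentes
instance (asistentes : Int) (out : Option Int × Option Int) : Decidable (Spec_cotizar asistentes out) := by unfold Spec_cotizar; infer_instance

-- ===== CLAIM (what is proved, stated in full; the proofs are below) =====
def Claim_equal_cotizar : Prop := ∀ (asistentes : Int), Dom_cotizar asistentes → Spec_cotizar asistentes (cotizar asistentes)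

-- ===== LEMMAS AND PROOFS =====

theorem bisectLeft_unfold (xs : List Int) (x : Int) (lo hi : Nat) :
    bisectLeft xs x lo hi =
      if lo < hi then
        if xs.getD ((lo + hi) / 2) 0 < x then bisectLeft xs x ((lo + hi) / 2 + 1) hi
        else bisectLeft xs x lo ((lo + hi) / 2)
      else lo := by
  rw [bisectLeft]

theorem cotizar_alt_eval (a : Int) :
    cotizar_alt a =
      if a ≤ 50 then (some 1000000, some 1500000)
      else if a ≤ 100 then (some 1800000, some 2400000)
      else if a ≤ 200 then (some 3500000, some 4000000)
      else if a ≤ 300 then (some 4100000, some 4600000)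
      else (none, none) := by
  unfold cotizar_alt
  by_cases h1 : a ≤ 50
  · simp [bisectLeft_unfold, h1, show ¬(200 < a) by omega, show ¬(100 < a) by omega,
      show ¬(50 < a) by omega]
  · by_cases h2 : a ≤ 100
    · simp [bisectLeft_unfold, h1, h2, show ¬(200 < a) by omega, show ¬(100 < a) by omega,
        show (50 < a) by omega]
    · by_cases h3 : a ≤ 200
      · simp [bisectLeft_unfold, h1, h2, h3, show ¬(200 < a) by omega, show (100 < a) by omega]
      · by_cases h4 : a ≤ 300
        · simp [bisectLeft_unfold, h1, h2, h3, h4, show (200 < a) by omega,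
            show ¬(300 < a) by omega]
        · simp [bisectLeft_unfold, h1, h2, h3, h4, show (200 < a) by omega,
            show (300 < a) by omega]

-- ===== VERDICT (by name: the statement is the Claim_ definition above) =====
theorem cotizar_spec : Claim_equal_cotizar := by
  intro a _
  unfold Spec_cotizar
  rw [cotizar_alt_eval]
  unfold cotizar cotizarLoop
  by_cases h1 : a ≤ 50 <;> by_cases h2 : a ≤ 100 <;> by_cases h3 : a ≤ 200 <;>
    by_cases h4 : a ≤ 300 <;> simp [cotizarLoop, *]
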